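-- pv_equiv track=rewrite | github.com/Anubhab93/greedy_graph_partition | similarity.py | check_all_clusters_similar
-- ===== SOURCE A (Python) =====
-- from collections import Counter
--
-- def check_two_clusters_similar(a, b):
--
--     """
--     :param a: one cluster - a list
--     :param b: another cluster - another list
--     :return: if the lists are identical regardless of the order, returns True, else returns false
--     """
--     if len(a) == 0:
--         return False
--     elif len(b) == 0:
--         return False
--     else:
--         return Counter(a) == Counter(b)
--
-- def check_all_clusters_similar(cla, clb):
--
--     """
--     :param cla: a 2D matrix, where each rows corresponds to one cluster
--     :param clb: another 2D matrix, where each rows corresponds to one cluster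
--     :return: True if all clusters are same, otherwise false
--     """
--
--     if len(cla) == len(clb):
--         no_rows = len(cla)
--         no_similar = 0
--         count = 0
--         while count < no_rows:
--             j = 0
--             while j < no_rows:
--                 dcsn = check_two_clusters_similar(cla[count], clb[j])
--                 if dcsn:
--                     no_similar += 1
--                     break
--                 else:
--                     j += 1
--             count += 1
--         if no_similar == no_rows:
--             return True
--         else:
--             return False
--     else:
--         return False
-- ===== SOURCE B (Python) =====
-- def check_all_clusters_similar(cla, clb):
--     if len(cla) != len(clb):
--         return False
--     sigs = {tuple(sorted(r)) for r in clb if r}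
--     return all(bool(r) and tuple(sorted(r)) in sigs for r in cla)
-- ===== Notes on version B (the rewrite author's own statement) =====
-- stated objective: faster
-- what changed: Replaces the nested index-driven while-loops (for every cla row a fresh linear scan of clb with Counter comparisons) by building a hash set of sorted-tuple signatures of the nonempty clb rows once and doing a single membership pass over cla.
import Mathlib
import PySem

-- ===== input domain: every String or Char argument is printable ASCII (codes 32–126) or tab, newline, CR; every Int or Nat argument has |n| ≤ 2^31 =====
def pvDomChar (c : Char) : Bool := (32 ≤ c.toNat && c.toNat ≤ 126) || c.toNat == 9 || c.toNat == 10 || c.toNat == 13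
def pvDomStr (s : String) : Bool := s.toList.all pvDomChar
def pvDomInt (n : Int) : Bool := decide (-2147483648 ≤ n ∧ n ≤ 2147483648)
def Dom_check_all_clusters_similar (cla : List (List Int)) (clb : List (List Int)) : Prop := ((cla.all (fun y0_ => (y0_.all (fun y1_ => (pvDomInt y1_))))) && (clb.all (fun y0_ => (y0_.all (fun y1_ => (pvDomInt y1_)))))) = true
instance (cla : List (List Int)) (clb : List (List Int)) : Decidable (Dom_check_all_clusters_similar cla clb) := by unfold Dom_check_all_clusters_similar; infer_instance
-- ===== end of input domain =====

-- B replaces A's nested while-loop scans (a fresh linear Counter-comparison scan of clb per cla row)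
-- by one precomputed set of sorted signatures of the nonempty clb rows and a single membership pass.

-- ===== PORT A =====
-- Counter(a) == Counter(b) is Python's order-insensitive dict equality: same key set and same value per key.
def check_two_clusters_similar (a : List Int) (b : List Int) : Bool :=
  if a.length = 0 then false
  else if b.length = 0 then false
  else
    let ca := PySem.Dict.counter a
    let cb := PySem.Dict.counter b
    PySem.Set.equal ca.keys cb.keys && ca.keys.all (fun k => ca.getD k 0 == cb.getD k 0)

-- inner 'while j < no_rows' loop of A; clb[j] is always in range when called (no_rows = len(clb)),
-- so the .getD [] default is never used.
def pvInnerA (row : List Int) (clb : List (List Int)) (noRows : Nat) (j : Nat) : Bool :=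
  if _h : j < noRows then
    if check_two_clusters_similar row ((PySem.List.pyGet? clb (j : Int)).getD []) then true
    else pvInnerA row clb noRows (j + 1)
  else false
  termination_by noRows - j

-- outer 'while count < no_rows' loop of A, carrying no_similar.
def pvOuterA (cla : List (List Int)) (clb : List (List Int)) (noRows : Nat) (count : Nat) (noSimilar : Nat) : Nat :=
  if _h : count < noRows then
    let dcsn := pvInnerA ((PySem.List.pyGet? cla (count : Int)).getD []) clb noRows 0
    pvOuterA cla clb noRows (count + 1) (if dcsn then noSimilar + 1 else noSimilar)
  else noSimilar
  termination_by noRows - count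

def check_all_clusters_similar (cla : List (List Int)) (clb : List (List Int)) : Bool :=
  if cla.length = clb.length then
    let noRows := cla.length
    let noSimilar := pvOuterA cla clb noRows 0 0
    if noSimilar = noRows then true else false
  else false

-- ===== PORT B =====
-- signature of a row: tuple(sorted(r))
def pvSig (r : List Int) : List Int := PySem.List.sorted r (fun x => x) false

def check_all_clusters_similar_alt (cla : List (List Int)) (clb : List (List Int)) : Bool :=
  if cla.length ≠ clb.length then false
  else
    let sigs : PySem.Set (List Int) :=
      PySem.Set.ofList ((clb.filter (fun r => !r.isEmpty)).map pvSig)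
    cla.all (fun r => !r.isEmpty && PySem.Set.contains sigs (pvSig r))

-- ===== PRECONDITION & SPEC =====
def Spec_check_all_clusters_similar (cla : List (List Int)) (clb : List (List Int)) (out : Bool) : Prop := out = check_all_clusters_similar_alt cla clb
instance (cla : List (List Int)) (clb : List (List Int)) (out : Bool) : Decidable (Spec_check_all_clusters_similar cla clb out) := by unfold Spec_check_all_clusters_similar; infer_instance

-- ===== CLAIM (what is proved, stated in full; the proofs are below) =====
def Claim_equal_check_all_clusters_similar : Prop := ∀ (cla : List (List Int)) (clb : List (List Int)), Dom_check_all_clusters_similar cla clb → Spec_check_all_clusters_similar cla clb (check_all_clusters_similar cla clb)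

-- ===== LEMMAS AND PROOFS =====

-- Counter equality test = permutation
theorem check_two_iff (a b : List Int) :
    check_two_clusters_similar a b = true ↔ a ≠ [] ∧ b ≠ [] ∧ a.Perm b := by
  unfold check_two_clusters_similar
  split_ifs with h1 h2
  · simp [List.length_eq_zero_iff.mp h1]
  · simp [List.length_eq_zero_iff.mp h2]
  · have ha : a ≠ [] := fun h => h1 (by simp [h])
    have hb : b ≠ [] := fun h => h2 (by simp [h])
    simp only [Bool.and_eq_true, PySem.Set.equal_iff, PySem.Dict.keys_counter,
      List.all_eq_true, PySem.Set.mem_ofList, PySem.Dict.getD_counter, beq_iff_eq,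
      ha, hb, ne_eq, not_false_eq_true, true_and]
    rw [List.perm_iff_count]
    constructor
    · rintro ⟨hk, hc⟩ v
      by_cases hv : v ∈ a
      · exact_mod_cast hc v hv
      · have hvb : v ∉ b := fun hvb => hv ((hk v).mpr hvb)
        simp [List.count_eq_zero_of_not_mem hv, List.count_eq_zero_of_not_mem hvb]
    · intro h
      refine ⟨fun x => ?_, fun k _ => by exact_mod_cast h k⟩
      constructor <;> intro hx <;> by_contra hc
      · exact (List.count_eq_zero_of_not_mem hc ▸ h x ▸ List.count_pos_iff.mpr hx).false
      · exact (List.count_eq_zero_of_not_mem hc ▸ (h x).symm ▸ List.count_pos_iff.mpr hx).false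

theorem pvInnerA_iff (row : List Int) (clb : List (List Int)) (j : Nat) (hj : j ≤ clb.length) :
    pvInnerA row clb clb.length j = (clb.drop j).any (fun b => check_two_clusters_similar row b) := by
  induction hn : clb.length - j generalizing j with
  | zero =>
    have : j = clb.length := by omega
    subst this
    rw [pvInnerA]
    simp [List.drop_length]
  | succ n ih =>
    have hjl : j < clb.length := by omega
    rw [pvInnerA]
    have hg : (PySem.List.pyGet? clb (j : Int)).getD [] = clb[j] := by
      simp [hjl]
    rw [List.drop_eq_getElem_cons hjl]
    simp only [hjl, dite_true, hg, List.any_cons]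
    split_ifs with hc
    · simp [hc]
    · rw [ih (j + 1) (by omega) (by omega)]
      simp [hc]

theorem pvOuterA_eq (cla clb : List (List Int)) (count ns : Nat) (hc : count ≤ cla.length) :
    pvOuterA cla clb cla.length count ns
      = ns + (cla.drop count).countP (fun row => pvInnerA row clb cla.length 0) := by
  induction hn : cla.length - count generalizing count ns with
  | zero =>
    have : count = cla.length := by omega
    subst this
    rw [pvOuterA]
    simp [List.drop_length]
  | succ n ih =>
    have hcl : count < cla.length := by omega
    rw [pvOuterA]
    have hg : (PySem.List.pyGet? cla (count : Int)).getD [] = cla[count] := by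
      simp [hcl]
    rw [List.drop_eq_getElem_cons hcl]
    simp only [hcl, dite_true, hg, List.countP_cons]
    rw [ih (count + 1) _ (by omega) (by omega)]
    split_ifs with hd <;> omega

-- A = true iff every cla row has a similar clb row (when lengths agree)
theorem portA_iff (cla clb : List (List Int)) (hl : cla.length = clb.length) :
    check_all_clusters_similar cla clb = true
      ↔ ∀ row ∈ cla, ∃ b ∈ clb, row ≠ [] ∧ b ≠ [] ∧ row.Perm b := by
  unfold check_all_clusters_similar
  rw [if_pos hl]
  show (if pvOuterA cla clb cla.length 0 0 = cla.length then true else false) = true ↔ _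
  rw [pvOuterA_eq cla clb 0 0 (by omega)]
  simp only [List.drop_zero, Nat.zero_add]
  have hcnt : (cla.countP (fun row => pvInnerA row clb cla.length 0) = cla.length) ↔
      ∀ row ∈ cla, pvInnerA row clb cla.length 0 = true := List.countP_eq_length
  constructor
  · intro h row hrow
    have h' : ∀ row ∈ cla, pvInnerA row clb cla.length 0 = true := by
      apply hcnt.mp
      by_contra hne
      rw [if_neg hne] at h
      exact Bool.false_ne_true h
    have := h' row hrow
    rw [hl, pvInnerA_iff row clb 0 (by omega)] at this
    simp only [List.drop_zero, List.any_eq_true] at this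
    obtain ⟨b, hb, hcb⟩ := this
    obtain ⟨h1, h2, h3⟩ := (check_two_iff row b).mp hcb
    exact ⟨b, hb, h1, h2, h3⟩
  · intro h
    rw [if_pos]
    apply hcnt.mpr
    intro row hrow
    obtain ⟨b, hb, h1, h2, h3⟩ := h row hrow
    rw [hl, pvInnerA_iff row clb 0 (by omega)]
    simp only [List.drop_zero, List.any_eq_true]
    exact ⟨b, hb, (check_two_iff row b).mpr ⟨h1, h2, h3⟩⟩

theorem portB_iff (cla clb : List (List Int)) (hl : cla.length = clb.length) :
    check_all_clusters_similar_alt cla clb = true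
      ↔ ∀ row ∈ cla, ∃ b ∈ clb, row ≠ [] ∧ b ≠ [] ∧ row.Perm b := by
  unfold check_all_clusters_similar_alt
  rw [if_neg (by simp [hl])]
  simp only [List.all_eq_true, Bool.and_eq_true, Bool.not_eq_eq_eq_not, Bool.not_true,
    List.isEmpty_eq_false_iff, ne_eq]
  have hmem : ∀ row : List Int,
      (PySem.Set.contains (PySem.Set.ofList ((clb.filter (fun r => !r.isEmpty)).map pvSig)) (pvSig row) = true)
        ↔ ∃ b ∈ clb, b ≠ [] ∧ row.Perm b := by
    intro row
    rw [show (PySem.Set.contains (PySem.Set.ofList ((clb.filter (fun r => !r.isEmpty)).map pvSig)) (pvSig row) = true)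
        ↔ pvSig row ∈ PySem.Set.ofList ((clb.filter (fun r => !r.isEmpty)).map pvSig) from by
      simp [PySem.Set.contains]]
    rw [PySem.Set.mem_ofList]
    simp only [List.mem_map, List.mem_filter, Bool.not_eq_eq_eq_not, Bool.not_true,
      List.isEmpty_eq_false_iff, ne_eq]
    constructor
    · rintro ⟨b, ⟨hbmem, hbne⟩, hsig⟩
      exact ⟨b, hbmem, hbne,
        (PySem.List.sorted_id_eq_sorted_id_iff_perm _ _).mp hsig.symm⟩
    · rintro ⟨b, hbmem, hbne, hperm⟩
      exact ⟨b, ⟨hbmem, hbne⟩, ((PySem.List.sorted_id_eq_sorted_id_iff_perm _ _).mpr hperm).symm⟩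
  constructor
  · intro h row hrow
    obtain ⟨h1, h2⟩ := h row hrow
    obtain ⟨b, hb, hbne, hperm⟩ := (hmem row).mp h2
    exact ⟨b, hb, h1, hbne, hperm⟩
  · intro h row hrow
    obtain ⟨b, hb, h1, h2, h3⟩ := h row hrow
    exact ⟨h1, (hmem row).mpr ⟨b, hb, h2, h3⟩⟩

-- ===== VERDICT (by name: the statement is the Claim_ definition above) =====
theorem check_all_clusters_similar_spec : Claim_equal_check_all_clusters_similar := by
  intro cla clb _
  unfold Spec_check_all_clusters_similar
  by_cases hl : cla.length = clb.length
  · rw [Bool.eq_iff_iff, portA_iff cla clb hl, portB_iff cla clb hl]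
  · unfold check_all_clusters_similar check_all_clusters_similar_alt
    simp [hl]
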